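-- pv_equiv track=rewrite | github.com/rkhass/Research | Feature_processing.py | adaptive_boards
-- ===== SOURCE A (Python) =====
-- def adaptive_boards(arr, N=2000):
--     cur_boarder = 0
--     boards = [0.]
--     counter = 0
--     counters = []
--     for cur_val in arr:
--         if counter < N:
--             cur_boarder = cur_val
--             counter += 1
--         else:
--             if cur_val == cur_boarder:
--                 counter += 1
--             else:
--                 counters.append(counter)
--                 boards.append(cur_boarder)
--                 cur_boarder = cur_val
--                 counter = 1
--
--     counters.append(counter)
--     boards.append(cur_boarder)
--
--     map_array = []
--     for i, num in enumerate(counters):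
--         map_array += [str(i)] * num
--
--     return map_array
-- ===== SOURCE B (Python) =====
-- def adaptive_boards(arr, N=2000):
--     # Single pass: the result depends only on segment indices, so emit the
--     # label for each element directly instead of collecting segment lengths
--     # and expanding them in a second loop.
--     cur_boarder = 0
--     counter = 0
--     seg = 0
--     map_array = []
--     for cur_val in arr:
--         if counter < N:
--             cur_boarder = cur_val
--             counter += 1
--         elif cur_val == cur_boarder:
--             counter += 1
--         else:
--             seg += 1
--             cur_boarder = cur_val
--             counter = 1
--         map_array.append(str(seg))
--     return map_array
-- ===== Notes on version B (the rewrite author's own statement) =====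
-- stated objective: simpler
-- what changed: B fuses A's count-then-expand two-phase algorithm into a single pass that drops the counters list and the second expansion loop, emitting each element's segment label str(seg) directly while maintaining only the segment index.
import Mathlib
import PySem

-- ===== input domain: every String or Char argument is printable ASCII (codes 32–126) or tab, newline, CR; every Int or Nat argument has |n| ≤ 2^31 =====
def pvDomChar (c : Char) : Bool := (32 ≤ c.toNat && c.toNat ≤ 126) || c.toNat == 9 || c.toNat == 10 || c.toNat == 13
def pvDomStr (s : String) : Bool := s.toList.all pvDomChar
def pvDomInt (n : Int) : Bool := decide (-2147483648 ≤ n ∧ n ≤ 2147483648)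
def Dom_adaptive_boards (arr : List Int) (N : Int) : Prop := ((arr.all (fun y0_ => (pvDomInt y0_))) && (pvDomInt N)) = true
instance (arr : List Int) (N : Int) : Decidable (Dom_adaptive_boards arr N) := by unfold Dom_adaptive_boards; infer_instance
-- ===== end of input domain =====

-- B fuses A's count-then-expand two-phase algorithm into one pass that emits each
-- element's label directly; return values proved equal on all inputs (simpler, same cost).

-- ===== PORT A =====
-- Loop state: (cur_boarder, counter, counters).  A's `boards` list is dead state
-- (initialised with the float 0. and never read for the return value); it is omitted.
def adaptive_boards (arr : List Int) (N : Int) : List String :=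
  let st := arr.foldl
    (fun (s : Int × Int × List Int) cur_val =>
      let (cur_boarder, counter, counters) := s
      if counter < N then (cur_val, counter + 1, counters)
      else if cur_val = cur_boarder then (cur_boarder, counter + 1, counters)
      else (cur_val, 1, counters ++ [counter]))
    (0, 0, [])
  let counters := st.2.2 ++ [st.2.1]
  (PySem.List.enumerate counters).foldl
    (fun map_array (p : Int × Int) => map_array ++ PySem.List.pyRepeat [PySem.Int.toStr p.1] p.2)
    []

-- ===== PORT B =====
-- Loop state: (cur_boarder, counter, seg, map_array).
def adaptive_boards_alt (arr : List Int) (N : Int) : List String :=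
  (arr.foldl
    (fun (s : Int × Int × Int × List String) cur_val =>
      let (cur_boarder, counter, seg, map_array) := s
      if counter < N then (cur_val, counter + 1, seg, map_array ++ [PySem.Int.toStr seg])
      else if cur_val = cur_boarder then (cur_boarder, counter + 1, seg, map_array ++ [PySem.Int.toStr seg])
      else (cur_val, 1, seg + 1, map_array ++ [PySem.Int.toStr (seg + 1)]))
    (0, 0, 0, [])).2.2.2

-- ===== PRECONDITION & SPEC =====
def Spec_adaptive_boards (arr : List Int) (N : Int) (out : List String) : Prop := out = adaptive_boards_alt arr N
instance (arr : List Int) (N : Int) (out : List String) : Decidable (Spec_adaptive_boards arr N out) := by unfold Spec_adaptive_boards; infer_instance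

-- ===== CLAIM (what is proved, stated in full; the proofs are below) =====
def Claim_equal_adaptive_boards : Prop := ∀ (arr : List Int) (N : Int), Dom_adaptive_boards arr N → Spec_adaptive_boards arr N (adaptive_boards arr N)

-- ===== LEMMAS AND PROOFS =====

-- A's expansion phase as a function of the counters list.
def pvExpand (counters : List Int) : List String :=
  (PySem.List.enumerate counters).foldl
    (fun map_array (p : Int × Int) => map_array ++ PySem.List.pyRepeat [PySem.Int.toStr p.1] p.2)
    []

lemma pvExpand_append (cs : List Int) (c : Int) :
    pvExpand (cs ++ [c])
      = pvExpand cs ++ List.replicate c.toNat (PySem.Int.toStr (cs.length : Int)) := by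
  simp [pvExpand, PySem.List.enumerate_append, List.foldl_append,
        PySem.List.pyRepeat_singleton]

-- Loop invariant: running both loops from related states leaves them related;
-- B's accumulated map_array equals the expansion of A's counters so far plus
-- the labels of the elements of the still-open segment.
lemma pv_loop (N : Int) :
    ∀ (arr : List Int) (cb counter : Int) (counters : List Int) (out : List String),
    0 ≤ counter →
    out = pvExpand counters ++ List.replicate counter.toNat (PySem.Int.toStr (counters.length : Int)) →
    (arr.foldl
      (fun (s : Int × Int × Int × List String) cur_val =>
        let (cur_boarder, counter, seg, map_array) := s
        if counter < N then (cur_val, counter + 1, seg, map_array ++ [PySem.Int.toStr seg])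
        else if cur_val = cur_boarder then (cur_boarder, counter + 1, seg, map_array ++ [PySem.Int.toStr seg])
        else (cur_val, 1, seg + 1, map_array ++ [PySem.Int.toStr (seg + 1)]))
      (cb, counter, (counters.length : Int), out)).2.2.2
    = (let st := arr.foldl
        (fun (s : Int × Int × List Int) cur_val =>
          let (cur_boarder, counter, counters) := s
          if counter < N then (cur_val, counter + 1, counters)
          else if cur_val = cur_boarder then (cur_boarder, counter + 1, counters)
          else (cur_val, 1, counters ++ [counter]))
        (cb, counter, counters)
       pvExpand (st.2.2 ++ [st.2.1])) := by
  intro arr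
  induction arr with
  | nil =>
      intro cb counter counters out hc hout
      simp only [List.foldl_nil]
      rw [pvExpand_append, hout]
  | cons v rest ih =>
      intro cb counter counters out hc hout
      simp only [List.foldl_cons]
      by_cases h1 : counter < N
      · simp only [h1, if_pos]
        refine ih v (counter + 1) counters (out ++ [PySem.Int.toStr (counters.length : Int)])
          (by omega) ?_
        rw [hout, List.append_assoc]
        congr 1
        have : (counter + 1).toNat = counter.toNat + 1 := by omega
        rw [this, List.replicate_succ']
      · by_cases h2 : v = cb
        · simp only [h1, h2, if_neg, if_pos, not_false_iff]
          refine ih cb (counter + 1) counters (out ++ [PySem.Int.toStr (counters.length : Int)])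
            (by omega) ?_
          rw [hout, List.append_assoc]
          congr 1
          have : (counter + 1).toNat = counter.toNat + 1 := by omega
          rw [this, List.replicate_succ']
        · simp only [h1, h2, if_neg, not_false_iff]
          have hlen : (((counters ++ [counter]).length : Int)) = (counters.length : Int) + 1 := by
            simp
          have := ih v 1 (counters ++ [counter])
            (out ++ [PySem.Int.toStr ((counters.length : Int) + 1)])
            (by omega)
            (by rw [hout, pvExpand_append, List.append_assoc]; simp)
          rw [hlen] at this
          simpa using this

-- ===== VERDICT (by name: the statement is the Claim_ definition above) =====
theorem adaptive_boards_spec : Claim_equal_adaptive_boards := by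
  intro arr N _
  unfold Spec_adaptive_boards adaptive_boards adaptive_boards_alt
  have h := pv_loop N arr 0 0 [] [] (by omega) (by simp [pvExpand])
  simpa [pvExpand] using h.symm
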